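-- pv_equiv track=rewrite | github.com/paveleroshkinweb/algorithms | algorithms/src/problems/see_battle.py | find_best_ship_size
-- ===== SOURCE A (Python) =====
-- def calculate_occupied_fields2(k):
--     ships_n = (k * (k+1)) // 2
--     extra = ((k-1) * k * (k+1)) // 3
--     fields = k * ships_n - extra + (ships_n - 1)
--     return fields
--
-- def find_best_ship_size(n):
--     left = 1
--     right = n
--
--     while left <= right:
--
--         middle = (left + right) // 2
--         fields = calculate_occupied_fields2(middle)
--
--         if fields == n:
--             return middle
--
--         if fields < n:
--             left = middle + 1
--         else:
--             right = middle - 1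
--
--     return left - 1
-- ===== SOURCE B (Python) =====
-- def calculate_occupied_fields2(k):
--     ships_n = (k * (k+1)) // 2
--     extra = ((k-1) * k * (k+1)) // 3
--     fields = k * ships_n - extra + (ships_n - 1)
--     return fields
--
-- def find_best_ship_size(n):
--     k = 0
--     while calculate_occupied_fields2(k + 1) <= n:
--         k += 1
--     return k
-- ===== Notes on version B (the rewrite author's own statement) =====
-- stated objective: simpler
-- what changed: Replaces the lo/hi binary search (with its three-way comparison and left-1 fallback) by a single advancing counter that probes consecutive sizes until the occupied fields exceed n.
import Mathlib
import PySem

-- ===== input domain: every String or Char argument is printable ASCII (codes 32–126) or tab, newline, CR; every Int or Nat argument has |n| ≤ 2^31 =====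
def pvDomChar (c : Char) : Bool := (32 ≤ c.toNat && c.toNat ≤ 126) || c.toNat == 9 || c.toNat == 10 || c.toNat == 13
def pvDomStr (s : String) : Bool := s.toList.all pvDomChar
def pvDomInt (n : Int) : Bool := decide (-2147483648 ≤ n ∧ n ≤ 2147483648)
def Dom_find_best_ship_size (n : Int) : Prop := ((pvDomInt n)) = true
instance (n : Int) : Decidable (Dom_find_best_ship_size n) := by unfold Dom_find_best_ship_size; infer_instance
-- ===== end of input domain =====

-- B replaces A's binary search by a linear scan of consecutive ship sizes: simpler control flow, same result.

-- ===== PORT A =====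
-- helper calculate_occupied_fields2, shared verbatim by both Pythons
def calculate_occupied_fields2 (k : Int) : Int :=
  let ships_n := PySem.Int.floordiv (k * (k + 1)) 2
  let extra := PySem.Int.floordiv ((k - 1) * k * (k + 1)) 3
  k * ships_n - extra + (ships_n - 1)

-- the 'while left <= right' binary-search loop of A; fuel is only a totality device
-- (fuel > right+1-left always holds where the loop is entered, proved below, so the 0 case is never hit)
def findLoopA (n : Int) : Nat → Int → Int → Int
  | fuel + 1, left, right =>
    if left ≤ right then
      let middle := PySem.Int.floordiv (left + right) 2
      let fields := calculate_occupied_fields2 middle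
      if fields = n then middle
      else if fields < n then findLoopA n fuel (middle + 1) right
      else findLoopA n fuel left (middle - 1)
    else left - 1
  | 0, left, _ => left - 1

def find_best_ship_size (n : Int) : Int := findLoopA n (n.toNat + 1) 1 n

-- ===== PORT B =====
-- the 'while calculate_occupied_fields2(k+1) <= n: k += 1' loop of B; k counts up from 0, so it is
-- carried as a Nat; fuel is only a totality device (fuel > n - k whenever the guard can hold, proved below)
def findLoopB (n : Int) : Nat → Nat → Int
  | fuel + 1, k =>
    if calculate_occupied_fields2 ((k : Int) + 1) ≤ n then findLoopB n fuel (k + 1) else (k : Int)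
  | 0, k => (k : Int)

def find_best_ship_size_alt (n : Int) : Int := findLoopB n (n.toNat + 1) 0

-- ===== PRECONDITION & SPEC =====
def Spec_find_best_ship_size (n : Int) (out : Int) : Prop := out = find_best_ship_size_alt n
instance (n : Int) (out : Int) : Decidable (Spec_find_best_ship_size n out) := by unfold Spec_find_best_ship_size; infer_instance

-- ===== CLAIM (what is proved, stated in full; the proofs are below) =====
def Claim_equal_find_best_ship_size : Prop := ∀ (n : Int), Dom_find_best_ship_size n → Spec_find_best_ship_size n (find_best_ship_size n)

-- ===== LEMMAS AND PROOFS =====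

-- exact closed form of the helper (both floor divisions are exact)
theorem calc_occ_closed (k : Int) :
    6 * calculate_occupied_fields2 k = k ^ 3 + 6 * k ^ 2 + 5 * k - 6 := by
  have h2 : PySem.Int.floordiv (k * (k + 1)) 2 * 2 = k * (k + 1) := by
    obtain ⟨s, hs⟩ : ∃ s, k * (k + 1) = 2 * s := by
      rcases Int.even_mul_succ_self k with ⟨s, hs⟩
      exact ⟨s, by omega⟩
    rw [hs, PySem.Int.floordiv_eq_ediv_of_pos (by omega)]
    omega
  have h3 : PySem.Int.floordiv ((k - 1) * k * (k + 1)) 3 * 3 = (k - 1) * k * (k + 1) := by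
    obtain ⟨s, hs⟩ : ∃ s, (k - 1) * k * (k + 1) = 3 * s := by
      obtain ⟨q, r, hr, hk⟩ : ∃ q r, (r = 0 ∨ r = 1 ∨ r = 2) ∧ k = 3 * q + r :=
        ⟨k / 3, k % 3, by omega, by omega⟩
      rcases hr with h | h | h <;> subst h <;> subst hk
      · exact ⟨q * (3 * q - 1) * (3 * q + 1), by ring⟩
      · exact ⟨q * (3 * q + 1) * (3 * q + 2), by ring⟩
      · exact ⟨(3 * q + 1) * (3 * q + 2) * (q + 1), by ring⟩
    rw [hs, PySem.Int.floordiv_eq_ediv_of_pos (by omega)]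
    omega
  simp only [calculate_occupied_fields2]
  have h2' : k * (PySem.Int.floordiv (k * (k + 1)) 2 * 2) = k * (k * (k + 1)) := by rw [h2]
  ring_nf
  ring_nf at h2 h3 h2'
  linarith [h2, h3, h2']

-- the helper's value is at least its argument on sizes ≥ 1 (bounds the scanned range)
theorem calc_occ_ge_self (m : Int) (hm : 1 ≤ m) : m ≤ calculate_occupied_fields2 m := by
  have h := calc_occ_closed m
  have hprod : 0 ≤ (m - 1) * ((m + 1) * (m + 6)) :=
    mul_nonneg (by omega) (mul_nonneg (by omega) (by omega))
  nlinarith [h, hprod]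

-- strict monotonicity on the nonnegative sizes
theorem calc_occ_strict_mono {a b : Int} (ha : 0 ≤ a) (hab : a < b) :
    calculate_occupied_fields2 a < calculate_occupied_fields2 b := by
  have h1 := calc_occ_closed a
  have h2 := calc_occ_closed b
  nlinarith [sq_nonneg (a + b), sq_nonneg a, sq_nonneg b, mul_nonneg ha (le_of_lt (lt_of_le_of_lt ha hab))]

-- the value both loops compute: the largest size whose occupied fields fit in n
def GoodSize (n r : Int) : Prop :=
  0 ≤ r ∧ calculate_occupied_fields2 r ≤ n ∧ n < calculate_occupied_fields2 (r + 1)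

theorem goodSize_unique {n r r' : Int} (h : GoodSize n r) (h' : GoodSize n r') : r = r' := by
  obtain ⟨hr0, hr1, hr2⟩ := h
  obtain ⟨hr0', hr1', hr2'⟩ := h'
  by_contra hne
  rcases lt_or_gt_of_ne hne with hlt | hlt
  · rcases lt_or_eq_of_le (by omega : r + 1 ≤ r') with h | h
    · exact absurd (lt_trans hr2 (calc_occ_strict_mono (by omega) h)) (not_lt.mpr hr1')
    · exact absurd (h ▸ hr2) (not_lt.mpr hr1')
  · rcases lt_or_eq_of_le (by omega : r' + 1 ≤ r) with h | h
    · exact absurd (lt_trans hr2' (calc_occ_strict_mono (by omega) h)) (not_lt.mpr hr1)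
    · exact absurd (h ▸ hr2') (not_lt.mpr hr1)

theorem findLoopA_good (n : Int) (fuel : Nat) (left right : Int) (hfuel : (right + 1 - left).toNat < fuel)
    (h1 : 1 ≤ left) (h2 : left ≤ right + 1)
    (hl : calculate_occupied_fields2 (left - 1) ≤ n)
    (hr : n < calculate_occupied_fields2 (right + 1)) :
    GoodSize n (findLoopA n fuel left right) := by
  induction fuel generalizing left right with
  | zero => omega
  | succ fuel ih =>
    rw [findLoopA]
    split
    · rename_i hle
      have hmid := PySem.Int.floordiv_two_mid_bounds (lo := left) (hi := right) hle
      set middle := PySem.Int.floordiv (left + right) 2 with hm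
      simp only
      split
      · rename_i heq
        refine ⟨by omega, le_of_eq heq, ?_⟩
        rw [← heq]
        exact calc_occ_strict_mono (by omega) (by omega)
      · split
        · rename_i hlt
          exact ih (middle + 1) right (by omega) (by omega) (by omega)
            (by simpa using le_of_lt hlt) hr
        · rename_i hne hnlt
          exact ih left (middle - 1) (by omega) h1 (by omega) hl
            (by simpa using lt_of_le_of_ne (not_lt.mp hnlt) (Ne.symm hne))
    · rename_i hgt
      have : left = right + 1 := by omega
      exact ⟨by omega, hl, by rw [sub_add_cancel, this]; exact hr⟩

theorem findLoopB_good (n : Int) (fuel k : Nat) (hfuel : n.toNat - k < fuel)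
    (hk : calculate_occupied_fields2 (k : Int) ≤ n) :
    GoodSize n (findLoopB n fuel k) := by
  induction fuel generalizing k with
  | zero => omega
  | succ fuel ih =>
    rw [findLoopB]
    split
    · rename_i h
      have hlow : (k : Int) + 1 ≤ n := le_trans (calc_occ_ge_self ((k : Int) + 1) (by omega)) h
      exact ih (k + 1) (by omega) (by push_cast; exact_mod_cast h)
    · rename_i h
      exact ⟨by positivity, hk, by omega⟩

-- ===== VERDICT (by name: the statement is the Claim_ definition above) =====
theorem find_best_ship_size_spec : Claim_equal_find_best_ship_size := by
  intro n _
  unfold Spec_find_best_ship_size find_best_ship_size find_best_ship_size_alt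
  by_cases hn : 1 ≤ n
  · have hA : GoodSize n (findLoopA n (n.toNat + 1) 1 n) := by
      apply findLoopA_good n (n.toNat + 1) 1 n (by omega) le_rfl (by omega)
      · have : calculate_occupied_fields2 0 = -1 := by decide
        simpa [this] using (by omega : (-1:Int) ≤ n)
      · have := calc_occ_ge_self (n + 1) (by omega)
        omega
    have hB : GoodSize n (findLoopB n (n.toNat + 1) 0) := by
      apply findLoopB_good n (n.toNat + 1) 0 (by omega)
      have : calculate_occupied_fields2 0 = -1 := by decide
      simp [this]; omega
    exact goodSize_unique hA hB
  · have hB : ¬ calculate_occupied_fields2 (((0 : Nat) : Int) + 1) ≤ n := by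
      have h1 : calculate_occupied_fields2 (((0 : Nat) : Int) + 1) = 1 := by decide
      omega
    rw [findLoopA, findLoopB, if_neg hn, if_neg hB]
    norm_num
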